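/- GENERATED by farm/mkstatement.py from design/units.tsv (unit `float32_unpack`) and the Specs of Vorbis/Spec/*.lean — do not edit.
   THE STATEMENT of the proof unit `float32_unpack`: the function `float32_unpack` (24 instructions) satisfies its contract,
   given the contracts of its callees. What the names mean: Vorbis/Spec/Basic.lean. The theorem to prove:
   `theorem float32_unpack_ok : Vorbis.Spec.float32_unpack.Statement`. -/
import Vorbis.Spec.Codebook
import Vorbis.Spec.Libm
namespace Vorbis.Spec.float32_unpack
open X86 X86.User Asan

/-- The statement of unit `float32_unpack`. -/
def Statement : Prop :=
  ∀ (Lay : Layout) (_hLay : Lay.hi = 0x1000000) (μ : Microarch) (_hμ : UserX.MicroOK μ) (u₀ : State)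
    (_hcode : HasCodeNat Lay u₀ Vorbis.L.float32_unpack.entry Vorbis.Code.code_float32_unpack.nat Vorbis.L.float32_unpack.size)
    (_h_ldexp : ∀ (others : List Obj) (frames : List (Nat × FrameLayout)), Calls Lay μ Vorbis.WayInv (Vorbis.conv u₀) Vorbis.L.ldexp.entry (Vorbis.Spec.ldexp.spec others frames)),
    ∀ (others : List Obj) (frames : List (Nat × FrameLayout)), Calls Lay μ Vorbis.WayInv (Vorbis.conv u₀) Vorbis.L.float32_unpack.entry (Vorbis.Spec.float32_unpack.spec others frames)

end Vorbis.Spec.float32_unpack
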